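-- pv_equiv track=rewrite | github.com/OrSimhon/Python-course-cs-BGU | HW_3_Strings_Dictionaries/Q1.py | sudoku_is_legal_with_lists
-- ===== SOURCE A (Python) =====
-- def sudoku_is_legal_with_lists(board):
--     cols = [list() for i in range(9)]
--     rows = [list() for i in range(9)]
--     squers = [list() for i in range(9)]
--
--     for r in range(9):
--         for c in range(9):
--             if board[r][c] == '.':
--                 continue
--             elif (board[r][c] in rows[r] or
--                   board[r][c] in cols[c] or
--                   board[r][c] in squers[((r // 3) * 3 + c // 3)]):
--                 return False
--             else:
--                 cols[c].append(board[r][c])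
--                 rows[r].append(board[r][c])
--                 squers[((r // 3) * 3 + c // 3)].append(board[r][c])
--     return True
-- ===== SOURCE B (Python) =====
-- def sudoku_is_legal_with_lists(board):
--     # Stateless scan: no accumulator lists; at each filled cell re-check the
--     # previously scanned cells of its row, column and box directly on the board.
--     for r in range(9):
--         for c in range(9):
--             v = board[r][c]
--             if v == '.':
--                 continue
--             if any(board[r][c2] == v for c2 in range(c)):
--                 return False
--             if any(board[r2][c] == v for r2 in range(r)):
--                 return False
--             br = r // 3 * 3
--             bc = c // 3 * 3
--             if any(board[r2][c2] == v
--                    for r2 in range(br, r + 1) for c2 in range(bc, bc + 3)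
--                    if (r2, c2) < (r, c)):
--                 return False
--     return True
-- ===== Notes on version B (the rewrite author's own statement) =====
-- stated objective: alternative
-- what changed: Replaces A's three maintained row/column/box accumulator lists (membership-test-then-append) with a stateless scan that, at each filled cell, re-checks the previously scanned cells of its row, column and box directly on the board, so no auxiliary state is built.
import Mathlib
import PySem

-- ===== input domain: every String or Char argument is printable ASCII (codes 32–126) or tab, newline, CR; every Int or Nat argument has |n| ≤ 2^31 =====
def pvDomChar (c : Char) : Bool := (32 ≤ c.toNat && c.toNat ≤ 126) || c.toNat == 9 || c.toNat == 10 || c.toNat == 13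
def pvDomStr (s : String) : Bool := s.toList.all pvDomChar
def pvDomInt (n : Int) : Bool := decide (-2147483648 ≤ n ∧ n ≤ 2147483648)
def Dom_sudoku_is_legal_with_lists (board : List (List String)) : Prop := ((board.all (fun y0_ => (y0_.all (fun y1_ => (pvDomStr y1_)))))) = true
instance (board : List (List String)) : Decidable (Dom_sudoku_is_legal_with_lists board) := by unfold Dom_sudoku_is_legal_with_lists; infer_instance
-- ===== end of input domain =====

-- B replaces A's three maintained row/column/box accumulator lists by a stateless scan
-- that, at each filled cell, re-checks the earlier cells of its row, column and box
-- directly on the board (objective: alternative).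

-- the row-major sequence of the 81 (r, c) cell indices of the two nested 'for' loops
def pvCells : List (Nat × Nat) :=
  (List.range 9).flatMap (fun r => (List.range 9).map (fun c => (r, c)))

-- ===== PORT A =====
-- A's nested loops with early return False, threading the rows/cols/squers lists;
-- the cell access board[r][c] is written with getD: exact wherever Python A returns
-- (an out-of-range access makes Python A raise IndexError — excluded by Pre_)
def aLoop (board : List (List String)) (cells : List (Nat × Nat))
    (rows cols squers : List (List String)) : Bool :=
  match cells with
  | [] => true
  | (r, c) :: rest =>
    let v := (board.getD r []).getD c ""
    if v == "." then aLoop board rest rows cols squers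
    else if (rows.getD r []).contains v || (cols.getD c []).contains v
         || (squers.getD ((r / 3) * 3 + c / 3) []).contains v then false
    else aLoop board rest
        (rows.set r ((rows.getD r []) ++ [v]))
        (cols.set c ((cols.getD c []) ++ [v]))
        (squers.set ((r / 3) * 3 + c / 3) ((squers.getD ((r / 3) * 3 + c / 3) []) ++ [v]))

def sudoku_is_legal_with_lists (board : List (List String)) : Bool :=
  aLoop board pvCells (List.replicate 9 []) (List.replicate 9 []) (List.replicate 9 [])

-- ===== PORT B =====
-- B's stateless scan: at each filled cell the three any(...) generator scans re-read
-- the earlier cells of the row (c2 < c), the column (r2 < r) and the box ((r2, c2)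
-- lexicographically before (r, c)); same getD cell access as above, exact wherever
-- Python B returns (Python B raises IndexError on exactly the inputs Python A does)
def bLoop (board : List (List String)) (cells : List (Nat × Nat)) : Bool :=
  match cells with
  | [] => true
  | (r, c) :: rest =>
    let v := (board.getD r []).getD c ""
    if v == "." then bLoop board rest
    else if (List.range c).any (fun c2 => (board.getD r []).getD c2 "" == v) then false
    else if (List.range r).any (fun r2 => (board.getD r2 []).getD c "" == v) then false
    else if (List.range' (r / 3 * 3) (r + 1 - r / 3 * 3)).any (fun r2 =>
        (List.range' (c / 3 * 3) 3).any (fun c2 =>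
          (decide (r2 < r) || (decide (r2 = r) && decide (c2 < c))) &&
          ((board.getD r2 []).getD c2 "" == v))) then false
    else bLoop board rest

def sudoku_is_legal_with_lists_alt (board : List (List String)) : Bool :=
  bLoop board pvCells

-- ===== PRECONDITION & SPEC =====
-- cell (r, c) lies strictly before the first out-of-range access of the row-major scan
def pvPrefixCell (board : List (List String)) (r c : Nat) : Bool :=
  decide (r < 9) && decide (r < board.length) && decide (c < 9) &&
  decide (c < (board.getD r []).length) && decide (∀ r' < r, 9 ≤ (board.getD r' []).length)

-- two distinct equal non-'.' cells of the scanned prefix sharing a row, column or box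
def pvConflict (board : List (List String)) (r1 c1 r2 c2 : Nat) : Bool :=
  pvPrefixCell board r1 c1 && pvPrefixCell board r2 c2 && decide ((r1, c1) ≠ (r2, c2)) &&
  decide ((board.getD r1 []).getD c1 "" = (board.getD r2 []).getD c2 "") &&
  decide ((board.getD r1 []).getD c1 "" ≠ ".") &&
  decide (r1 = r2 ∨ c1 = c2 ∨ r1 / 3 * 3 + c1 / 3 = r2 / 3 * 3 + c2 / 3)

-- Pre_ is exactly the set of inputs on which Python A (and equally Python B) returns
-- instead of raising IndexError: either the board is 9x9-complete, or a duplicate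
-- conflict occurs already among the cells the row-major scan reaches before its first
-- out-of-range access (then the scan returns False before raising).
def Pre_sudoku_is_legal_with_lists (board : List (List String)) : Prop :=
  (9 ≤ board.length ∧ ∀ r < 9, 9 ≤ (board.getD r []).length) ∨
  ∃ r1 < 9, ∃ c1 < 9, ∃ r2 < 9, ∃ c2 < 9, pvConflict board r1 c1 r2 c2 = true
instance (board : List (List String)) : Decidable (Pre_sudoku_is_legal_with_lists board) := by
  unfold Pre_sudoku_is_legal_with_lists; infer_instance

def pvWitness_sudoku_is_legal_with_lists : List (List String) :=
  List.replicate 9 (List.replicate 9 ".")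

def Spec_sudoku_is_legal_with_lists (board : List (List String)) (out : Bool) : Prop := out = sudoku_is_legal_with_lists_alt board
instance (board : List (List String)) (out : Bool) : Decidable (Spec_sudoku_is_legal_with_lists board out) := by unfold Spec_sudoku_is_legal_with_lists; infer_instance

-- ===== CLAIM (what is proved, stated in full; the proofs are below) =====
def Claim_equal_sudoku_is_legal_with_lists : Prop := ∀ (board : List (List String)), Dom_sudoku_is_legal_with_lists board → Pre_sudoku_is_legal_with_lists board → Spec_sudoku_is_legal_with_lists board (sudoku_is_legal_with_lists board)

-- ===== LEMMAS AND PROOFS =====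

-- proof-side replay of A's state building: gathering the non-'.' values of a cell
-- list into the row/column/box groups (used to characterise aLoop's running state)
def bBuild (board : List (List String)) (cells : List (Nat × Nat))
    (rows cols boxes : List (List String)) :
    List (List String) × List (List String) × List (List String) :=
  match cells with
  | [] => (rows, cols, boxes)
  | (r, c) :: rest =>
    let v := (board.getD r []).getD c ""
    if v != "." then
      bBuild board rest
        (rows.set r ((rows.getD r []) ++ [v]))
        (cols.set c ((cols.getD c []) ++ [v]))
        (boxes.set ((r / 3) * 3 + c / 3) ((boxes.getD ((r / 3) * 3 + c / 3) []) ++ [v]))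
    else bBuild board rest rows cols boxes

lemma getD_set_eq (l : List (List String)) (j : Nat) (x : List String) (i : Nat) :
    (l.set j x).getD i [] = if i = j ∧ j < l.length then x else l.getD i [] := by
  simp only [List.getD, List.getElem?_set]
  by_cases hij : i = j
  · subst hij
    by_cases hj : i < l.length <;> simp [hj]
  · simp [hij, Ne.symm hij]

lemma getD_replicate (i : Nat) : (List.replicate 9 ([] : List String)).getD i [] = [] := by
  rcases Nat.lt_or_ge i 9 with h | h
  · rw [List.getD_eq_getElem _ _ (by simp [h])]
    exact List.getElem_replicate _
  · rw [List.getD_eq_getElem?_getD, List.getElem?_eq_none (by simp [h])]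
    rfl

lemma bBuild_append (board : List (List String)) (xs ys : List (Nat × Nat)) :
    ∀ rows cols boxes, bBuild board (xs ++ ys) rows cols boxes =
      bBuild board ys (bBuild board xs rows cols boxes).1
        (bBuild board xs rows cols boxes).2.1 (bBuild board xs rows cols boxes).2.2 := by
  induction xs with
  | nil => intro rows cols boxes; rfl
  | cons p rest ih =>
    intro rows cols boxes
    obtain ⟨r, c⟩ := p
    simp only [List.cons_append, bBuild]
    by_cases hv : ((board.getD r []).getD c "" != ".") = true
    · simp only [hv, if_pos]
      exact ih _ _ _
    · simp only [hv, if_neg, Bool.false_eq_true, not_false_iff]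
      exact ih _ _ _

-- the content of each group bBuild gathers: the initial group followed by the values
-- of the matching non-'.' cells, in scan order
lemma bBuild_groups (board : List (List String)) (cells : List (Nat × Nat)) :
    ∀ (rows cols boxes : List (List String)),
      (∀ i, (bBuild board cells rows cols boxes).1.getD i [] =
        rows.getD i [] ++ (if i < rows.length then
          (cells.filter (fun p => decide (p.1 = i) &&
            ((board.getD p.1 []).getD p.2 "" != "."))).map
            (fun p => (board.getD p.1 []).getD p.2 "") else [])) ∧
      (∀ i, (bBuild board cells rows cols boxes).2.1.getD i [] =
        cols.getD i [] ++ (if i < cols.length then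
          (cells.filter (fun p => decide (p.2 = i) &&
            ((board.getD p.1 []).getD p.2 "" != "."))).map
            (fun p => (board.getD p.1 []).getD p.2 "") else [])) ∧
      (∀ i, (bBuild board cells rows cols boxes).2.2.getD i [] =
        boxes.getD i [] ++ (if i < boxes.length then
          (cells.filter (fun p => decide (p.1 / 3 * 3 + p.2 / 3 = i) &&
            ((board.getD p.1 []).getD p.2 "" != "."))).map
            (fun p => (board.getD p.1 []).getD p.2 "") else [])) := by
  induction cells with
  | nil =>
    intro rows cols boxes
    refine ⟨fun i => ?_, fun i => ?_, fun i => ?_⟩ <;> simp [bBuild]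
  | cons p rest ih =>
    intro rows cols boxes
    obtain ⟨r, c⟩ := p
    simp only [bBuild]
    by_cases hv : ((board.getD r []).getD c "" != ".") = true
    · simp only [hv, if_pos]
      have hvne : ¬ ((board.getD r []).getD c "" = ".") := bne_iff_ne.mp hv
      simp only [List.getD_eq_getElem?_getD] at hvne
      set v := (board.getD r []).getD c "" with hvdef
      obtain ⟨ih1, ih2, ih3⟩ := ih (rows.set r ((rows.getD r []) ++ [v]))
        (cols.set c ((cols.getD c []) ++ [v]))
        (boxes.set ((r / 3) * 3 + c / 3) ((boxes.getD ((r / 3) * 3 + c / 3) []) ++ [v]))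
      refine ⟨fun i => ?_, fun i => ?_, fun i => ?_⟩
      · rw [ih1 i, getD_set_eq, List.filter_cons, List.length_set]
        by_cases hir : i = r
        · subst hir
          by_cases hlen : i < rows.length
          · simp [hlen, hvne, hvdef]
          · simp [hlen]
        · simp [hir, show ¬ (r = i) from fun h => hir h.symm]
      · rw [ih2 i, getD_set_eq, List.filter_cons, List.length_set]
        by_cases hic : i = c
        · subst hic
          by_cases hlen : i < cols.length
          · simp [hlen, hvne, hvdef]
          · simp [hlen]
        · simp [hic, show ¬ (c = i) from fun h => hic h.symm]
      · rw [ih3 i, getD_set_eq, List.filter_cons, List.length_set]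
        by_cases hib : i = r / 3 * 3 + c / 3
        · by_cases hlen : r / 3 * 3 + c / 3 < boxes.length
          · simp [hib, hlen, hvne, hvdef]
          · simp [hib, hlen]
        · simp [hib, show ¬ (r / 3 * 3 + c / 3 = i) from fun h => hib h.symm]
    · simp only [hv, if_neg, Bool.false_eq_true, not_false_iff]
      obtain ⟨ih1, ih2, ih3⟩ := ih rows cols boxes
      have hveq : (board.getD r []).getD c "" = "." := by
        simpa using hv
      simp only [List.getD_eq_getElem?_getD] at hveq
      refine ⟨fun i => ?_, fun i => ?_, fun i => ?_⟩
      · rw [ih1 i, List.filter_cons]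
        simp [hveq]
      · rw [ih2 i, List.filter_cons]
        simp [hveq]
      · rw [ih3 i, List.filter_cons]
        simp [hveq]

-- lexicographic (row-major) order on cell indices
def pvLex (p q : Nat × Nat) : Prop := p.1 < q.1 ∨ (p.1 = q.1 ∧ p.2 < q.2)

lemma mem_pvCells_iff (x : Nat × Nat) : x ∈ pvCells ↔ x.1 < 9 ∧ x.2 < 9 := by
  obtain ⟨r, c⟩ := x
  simp only [pvCells, List.mem_flatMap, List.mem_map, List.mem_range]
  constructor
  · rintro ⟨a, ha, b, hb, h⟩
    obtain ⟨rfl, rfl⟩ := Prod.mk.injEq .. ▸ h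
    exact ⟨ha, hb⟩
  · rintro ⟨hr, hc⟩
    exact ⟨r, hr, c, hc, rfl⟩

lemma pairwise_pvCells : pvCells.Pairwise pvLex := by
  unfold pvCells pvLex
  decide

-- in a lex-sorted cell list split as done ++ p :: rest, 'done' holds exactly the
-- members that are lexicographically before p
lemma split_mem {l done rest : List (Nat × Nat)} {p : Nat × Nat}
    (hpw : l.Pairwise pvLex) (heq : l = done ++ p :: rest) (x : Nat × Nat) :
    x ∈ done ↔ x ∈ l ∧ pvLex x p := by
  subst heq
  rw [List.pairwise_append] at hpw
  constructor
  · intro hx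
    exact ⟨List.mem_append_left _ hx, hpw.2.2 x hx p (by simp)⟩
  · rintro ⟨hl, hlex⟩
    rcases List.mem_append.1 hl with h | h
    · exact h
    · exfalso
      rcases List.mem_cons.1 h with rfl | h
      · unfold pvLex at hlex; omega
      · have := List.pairwise_cons.1 hpw.2.1
        have h2 := this.1 x h
        unfold pvLex at hlex h2; omega

-- the heart of the equivalence: with A's state equal to the gathering of the already
-- scanned cells, A's membership tests agree with B's direct re-scans, cell by cell
lemma loop_eq (board : List (List String)) :
    ∀ (todo done : List (Nat × Nat)), pvCells = done ++ todo →
    aLoop board todo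
      (bBuild board done (List.replicate 9 []) (List.replicate 9 []) (List.replicate 9 [])).1
      (bBuild board done (List.replicate 9 []) (List.replicate 9 []) (List.replicate 9 [])).2.1
      (bBuild board done (List.replicate 9 []) (List.replicate 9 []) (List.replicate 9 [])).2.2 =
    bLoop board todo := by
  intro todo
  induction todo with
  | nil => intro done _; rfl
  | cons p rest ih =>
    intro done heq
    obtain ⟨r, c⟩ := p
    have hmem : (r, c) ∈ pvCells := by rw [heq]; simp
    obtain ⟨hr9, hc9⟩ := (mem_pvCells_iff _).1 hmem
    have hsplit := fun x => split_mem pairwise_pvCells heq x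
    have hstep := ih (done ++ [(r, c)]) (by rw [heq, List.append_assoc]; rfl)
    rw [bBuild_append] at hstep
    obtain ⟨hgr, hgc, hgb⟩ := bBuild_groups board done
      (List.replicate 9 []) (List.replicate 9 []) (List.replicate 9 [])
    simp only [aLoop, bLoop]
    by_cases hdot : (board.getD r []).getD c "" = "."
    · rw [if_pos (beq_iff_eq.mpr hdot), if_pos (beq_iff_eq.mpr hdot)]
      simp only [bBuild, bne_iff_ne, ne_eq, hdot, not_true_eq_false, if_neg,
        not_false_eq_true, reduceIte] at hstep
      exact hstep
    · rw [if_neg (fun h => hdot (beq_iff_eq.mp h)), if_neg (fun h => hdot (beq_iff_eq.mp h))]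
      set v := (board.getD r []).getD c "" with hvdef
      -- rows[r] membership = row re-scan
      have e1 : ((bBuild board done (List.replicate 9 []) (List.replicate 9 [])
            (List.replicate 9 [])).1.getD r []).contains v
          = (List.range c).any (fun c2 => (board.getD r []).getD c2 "" == v) := by
        rw [Bool.eq_iff_iff]
        rw [hgr r, getD_replicate]
        simp only [List.length_replicate, hr9, if_pos, List.nil_append,
          List.contains_iff_mem, List.mem_map, List.mem_filter, Bool.and_eq_true,
          decide_eq_true_eq, bne_iff_ne, ne_eq, List.any_eq_true, List.mem_range,
          beq_iff_eq]
        constructor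
        · rintro ⟨⟨r2, c2⟩, ⟨hin, hre, -⟩, hval⟩
          obtain ⟨hpv, hlex⟩ := (hsplit _).1 hin
          simp only at hre
          subst hre
          unfold pvLex at hlex
          exact ⟨c2, by simp only at hlex; omega, hval⟩
        · rintro ⟨c2, hc2, hval⟩
          exact ⟨(r, c2), ⟨(hsplit _).2 ⟨(mem_pvCells_iff _).2 ⟨hr9, by omega⟩,
            Or.inr ⟨rfl, hc2⟩⟩, rfl, fun h => hdot (h ▸ hval ▸ rfl)⟩, hval⟩
      -- cols[c] membership = column re-scan
      have e2 : ((bBuild board done (List.replicate 9 []) (List.replicate 9 [])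
            (List.replicate 9 [])).2.1.getD c []).contains v
          = (List.range r).any (fun r2 => (board.getD r2 []).getD c "" == v) := by
        rw [Bool.eq_iff_iff]
        rw [hgc c, getD_replicate]
        simp only [List.length_replicate, hc9, if_pos, List.nil_append,
          List.contains_iff_mem, List.mem_map, List.mem_filter, Bool.and_eq_true,
          decide_eq_true_eq, bne_iff_ne, ne_eq, List.any_eq_true, List.mem_range,
          beq_iff_eq]
        constructor
        · rintro ⟨⟨r2, c2⟩, ⟨hin, hce, -⟩, hval⟩
          obtain ⟨hpv, hlex⟩ := (hsplit _).1 hin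
          simp only at hce
          subst hce
          unfold pvLex at hlex
          exact ⟨r2, by simp only at hlex; omega, hval⟩
        · rintro ⟨r2, hr2, hval⟩
          exact ⟨(r2, c), ⟨(hsplit _).2 ⟨(mem_pvCells_iff _).2 ⟨by omega, hc9⟩,
            Or.inl hr2⟩, rfl, fun h => hdot (h ▸ hval ▸ rfl)⟩, hval⟩
      -- squers[box] membership = box re-scan
      have e3 : ((bBuild board done (List.replicate 9 []) (List.replicate 9 [])
            (List.replicate 9 [])).2.2.getD (r / 3 * 3 + c / 3) []).contains v
          = (List.range' (r / 3 * 3) (r + 1 - r / 3 * 3)).any (fun r2 =>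
              (List.range' (c / 3 * 3) 3).any (fun c2 =>
                (decide (r2 < r) || (decide (r2 = r) && decide (c2 < c))) &&
                ((board.getD r2 []).getD c2 "" == v))) := by
        rw [Bool.eq_iff_iff]
        rw [hgb (r / 3 * 3 + c / 3), getD_replicate]
        simp only [List.length_replicate, show r / 3 * 3 + c / 3 < 9 by omega, if_pos,
          List.nil_append, List.contains_iff_mem, List.mem_map, List.mem_filter,
          Bool.and_eq_true, Bool.or_eq_true, decide_eq_true_eq, bne_iff_ne, ne_eq,
          List.any_eq_true, List.mem_range'_1, beq_iff_eq]
        constructor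
        · rintro ⟨⟨r2, c2⟩, ⟨hin, hbe, -⟩, hval⟩
          obtain ⟨hpv, hlex⟩ := (hsplit _).1 hin
          obtain ⟨h2r, h2c⟩ := (mem_pvCells_iff _).1 hpv
          simp only at hbe h2r h2c
          unfold pvLex at hlex
          simp only at hlex
          exact ⟨r2, by omega, c2, by omega, by omega, hval⟩
        · rintro ⟨r2, hr2, c2, hc2, hlex, hval⟩
          exact ⟨(r2, c2), ⟨(hsplit _).2 ⟨(mem_pvCells_iff _).2 ⟨by omega, by omega⟩,
            by unfold pvLex; simp only; omega⟩, by simp only; omega,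
            fun h => hdot (h ▸ hval ▸ rfl)⟩, hval⟩
      rw [e1, e2, e3]
      by_cases b1 : ((List.range c).any fun c2 => (board.getD r []).getD c2 "" == v) = true
      · rw [if_pos (by rw [Bool.or_eq_true, Bool.or_eq_true]; exact Or.inl (Or.inl b1)), if_pos b1]
      · have b1' : ((List.range c).any fun c2 => (board.getD r []).getD c2 "" == v) = false :=
          Bool.eq_false_iff.mpr b1
        rw [if_neg b1]
        by_cases b2 : ((List.range r).any fun r2 => (board.getD r2 []).getD c "" == v) = true
        · rw [if_pos (by rw [Bool.or_eq_true, Bool.or_eq_true]; exact Or.inl (Or.inr b2)), if_pos b2]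
        · have b2' : ((List.range r).any fun r2 => (board.getD r2 []).getD c "" == v) = false :=
            Bool.eq_false_iff.mpr b2
          rw [if_neg b2]
          by_cases b3 : ((List.range' (r / 3 * 3) (r + 1 - r / 3 * 3)).any fun r2 =>
              (List.range' (c / 3 * 3) 3).any fun c2 =>
                (decide (r2 < r) || (decide (r2 = r) && decide (c2 < c))) &&
                ((board.getD r2 []).getD c2 "" == v)) = true
          · rw [if_pos (by rw [Bool.or_eq_true, Bool.or_eq_true]; exact Or.inr b3), if_pos b3]
          · have b3' : ((List.range' (r / 3 * 3) (r + 1 - r / 3 * 3)).any fun r2 =>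
                (List.range' (c / 3 * 3) 3).any fun c2 =>
                  (decide (r2 < r) || (decide (r2 = r) && decide (c2 < c))) &&
                  ((board.getD r2 []).getD c2 "" == v)) = false :=
              Bool.eq_false_iff.mpr b3
            rw [if_neg b3, if_neg (by rw [b1', b2', b3']; simp)]
            simp only [bBuild] at hstep
            rw [if_pos (bne_iff_ne.mpr hdot)] at hstep
            exact hstep

-- ===== VERDICT (by name: the statement is the Claim_ definition above) =====
theorem sudoku_is_legal_with_lists_spec : Claim_equal_sudoku_is_legal_with_lists := by
  intro board _ _
  unfold Spec_sudoku_is_legal_with_lists sudoku_is_legal_with_lists sudoku_is_legal_with_lists_alt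
  exact loop_eq board pvCells [] rfl
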